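-- pv_equiv track=rewrite | github.com/parkjunga/algorithm | 프로그래머스_lev01/부족한금액계산하기.py | solution
-- ===== SOURCE A (Python) =====
-- def solution(price, money, count):
--     answer = 0
--     result_price = 0
--
--     for i in range(1,count+1):
--         result_price += i * price
--
--     if money < result_price:
--         answer = result_price - money
--
--     return answer
-- ===== SOURCE B (Python) =====
-- def solution(price, money, count):
--     n = max(count, 0)
--     total = price * n * (n + 1) // 2
--     return max(0, total - money)
-- ===== Notes on version B (the rewrite author's own statement) =====
-- stated objective: faster
-- what changed: Replaces the O(count) summation loop by the closed-form arithmetic-series formula price*n*(n+1)//2 and a max with 0.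
import Mathlib
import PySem

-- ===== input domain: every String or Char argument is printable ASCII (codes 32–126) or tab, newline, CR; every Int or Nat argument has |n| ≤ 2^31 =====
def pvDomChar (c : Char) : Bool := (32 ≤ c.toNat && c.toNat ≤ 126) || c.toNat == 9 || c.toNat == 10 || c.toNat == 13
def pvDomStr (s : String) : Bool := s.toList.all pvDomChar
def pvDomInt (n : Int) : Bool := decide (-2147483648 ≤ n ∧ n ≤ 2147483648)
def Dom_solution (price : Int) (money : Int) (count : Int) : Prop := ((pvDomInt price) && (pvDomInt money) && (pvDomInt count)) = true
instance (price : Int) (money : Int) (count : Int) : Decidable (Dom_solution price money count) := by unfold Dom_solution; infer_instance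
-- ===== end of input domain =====

-- B replaces A's O(count) summation loop by the closed-form arithmetic series (objective: faster).

-- ===== PORT A =====
def solution (price : Int) (money : Int) (count : Int) : Int :=
  let answer : Int := 0
  let result_price : Int :=
    (PySem.List.pyRange 1 (count + 1) 1).foldl (fun acc i => acc + i * price) 0
  if money < result_price then result_price - money else answer

-- ===== PORT B =====
def solution_alt (price : Int) (money : Int) (count : Int) : Int :=
  let n : Int := max count 0
  let total : Int := PySem.Int.floordiv (price * n * (n + 1)) 2
  max 0 (total - money)

-- ===== PRECONDITION & SPEC =====
def Spec_solution (price : Int) (money : Int) (count : Int) (out : Int) : Prop := out = solution_alt price money count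
instance (price : Int) (money : Int) (count : Int) (out : Int) : Decidable (Spec_solution price money count out) := by unfold Spec_solution; infer_instance

-- ===== CLAIM (what is proved, stated in full; the proofs are below) =====
def Claim_equal_solution : Prop := ∀ (price : Int) (money : Int) (count : Int), Dom_solution price money count → Spec_solution price money count (solution price money count)

-- ===== LEMMAS AND PROOFS =====

-- Twice A's loop sum equals price * m * (m+1), by induction on the loop bound.
theorem pv_two_mul_loop (price : Int) (m : Nat) :
    2 * ((PySem.List.pyRange 1 ((m : Int) + 1) 1).foldl (fun acc i => acc + i * price) 0)
      = price * m * (m + 1) := by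
  induction m with
  | zero => simp [PySem.List.pyRange_one_eq_nil]
  | succ k ih =>
      have h : PySem.List.pyRange 1 ((k : Int) + 1 + 1) 1
          = PySem.List.pyRange 1 ((k : Int) + 1) 1 ++ [(k : Int) + 1] :=
        PySem.List.pyRange_one_succ_right (by omega)
      push_cast
      push_cast at ih
      rw [show ((k : Int) + 1 + 1) = ((k : Int) + 1) + 1 by ring, h, List.foldl_append]
      simp only [List.foldl_cons, List.foldl_nil]
      ring_nf
      ring_nf at ih
      omega

theorem pv_loop_eq_closed (price count : Int) :
    ((PySem.List.pyRange 1 (count + 1) 1).foldl (fun acc i => acc + i * price) 0)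
      = PySem.Int.floordiv (price * (max count 0) * ((max count 0) + 1)) 2 := by
  by_cases hc : count ≤ 0
  · rw [PySem.List.pyRange_one_eq_nil (by omega)]
    have hmax : max count 0 = 0 := by omega
    rw [hmax]
    simp [PySem.Int.floordiv]
  · have hmax : max count 0 = count := by omega
    obtain ⟨m, hm⟩ : ∃ m : Nat, count = (m : Int) := ⟨count.toNat, by omega⟩
    have h2 := pv_two_mul_loop price m
    rw [hmax, hm]
    rw [PySem.Int.floordiv_eq_ediv_of_pos (by omega), ← h2]
    omega

-- ===== VERDICT (by name: the statement is the Claim_ definition above) =====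
theorem solution_spec : Claim_equal_solution := by
  intro price money count _
  unfold Spec_solution solution solution_alt
  dsimp only
  rw [pv_loop_eq_closed]
  omega
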